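-- pv_equiv track=rewrite | github.com/Aryanb1102/Columnar-Transposition-python- | import random.py | get_numeric_key
-- ===== SOURCE A (Python) =====
-- def get_numeric_key(key):
--     # Assign numerical values to key letters based on their order in the sorted key
--     key_upper = key.upper()
--     key_indices = list(range(len(key_upper)))
--     key_chars_with_indices = list(zip(key_upper, key_indices))
--     # Sort the key letters alphabetically, maintaining original indices for duplicates
--     sorted_key = sorted(key_chars_with_indices)
--     numeric_assignments = {}
--     num = 1
--     for char, original_idx in sorted_key:
--         numeric_assignments[original_idx] = num
--         num += 1
--     # Build the numeric key based on original positions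
--     numeric_key = [numeric_assignments[idx] for idx in key_indices]
--     return numeric_key
-- ===== SOURCE B (Python) =====
-- def get_numeric_key(key):
--     u = key.upper()
--     return [1 + sum(1 for j, cj in enumerate(u) if (cj, j) < (ci, i))
--             for i, ci in enumerate(u)]
-- ===== Notes on version B (the rewrite author's own statement) =====
-- stated objective: alternative
-- what changed: Replaces sort + dict of ranks + rebuild-by-index with a direct counting rank: each position's number is 1 plus the count of (char, index) pairs strictly smaller in the same lexicographic order, so no sorting and no dict.
import Mathlib
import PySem

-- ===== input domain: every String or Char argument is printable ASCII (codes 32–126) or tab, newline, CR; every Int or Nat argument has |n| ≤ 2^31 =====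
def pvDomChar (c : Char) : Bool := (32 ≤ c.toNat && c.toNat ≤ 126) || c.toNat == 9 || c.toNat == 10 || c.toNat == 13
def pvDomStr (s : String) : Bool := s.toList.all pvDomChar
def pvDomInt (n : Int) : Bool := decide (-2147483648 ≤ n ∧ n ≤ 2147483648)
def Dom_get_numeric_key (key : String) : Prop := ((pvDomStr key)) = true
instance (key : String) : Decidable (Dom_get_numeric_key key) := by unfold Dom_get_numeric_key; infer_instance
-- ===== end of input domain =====

-- B computes each rank directly as 1 + the number of strictly smaller (char, index) pairs,
-- replacing A's sort + rank dict + rebuild-by-index; alternative algorithm, not claimed faster.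

-- ===== PORT A =====
def get_numeric_key (key : String) : List Int :=
  let key_upper := PySem.Str.upper key
  let key_indices := PySem.List.pyRange 0 (PySem.Str.len key_upper) 1
  let key_chars_with_indices := key_upper.toList.zip key_indices
  let sorted_key := PySem.List.sorted2 key_chars_with_indices Prod.fst Prod.snd
  let final := sorted_key.foldl
    (fun (acc : PySem.Dict Int Int × Int) p => (acc.1.insert p.2 acc.2, acc.2 + 1))
    (PySem.Dict.empty, 1)
  key_indices.map (fun idx => final.1.getD idx 0)

-- ===== PORT B =====
def get_numeric_key_alt (key : String) : List Int :=
  let u := (PySem.Str.upper key).toList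
  (PySem.List.enumerate u 0).map (fun p =>
    1 + ((PySem.List.enumerate u 0).countP
      (fun q => decide (q.2 < p.2 ∨ (q.2 = p.2 ∧ q.1 < p.1))) : Int))

-- ===== PRECONDITION & SPEC =====
def Spec_get_numeric_key (key : String) (out : List Int) : Prop := out = get_numeric_key_alt key
instance (key : String) (out : List Int) : Decidable (Spec_get_numeric_key key out) := by unfold Spec_get_numeric_key; infer_instance

-- ===== CLAIM (what is proved, stated in full; the proofs are below) =====
def Claim_equal_get_numeric_key : Prop := ∀ (key : String), Dom_get_numeric_key key → Spec_get_numeric_key key (get_numeric_key key)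

-- ===== LEMMAS AND PROOFS =====

-- sorted2 with fst/snd keys is sorting by the lexicographic order on the pair
theorem sorted2_eq_sorted_lex (xs : List (Char × Int)) :
    PySem.List.sorted2 xs Prod.fst Prod.snd = PySem.List.sorted xs (fun p => toLex p) := by
  show List.foldl _ [] xs = List.foldl _ [] xs
  have hcmp : (fun (a b : Char × Int) => decide (a.1 < b.1) || (!decide (b.1 < a.1) && decide (a.2 < b.2)))
      = (fun (a b : Char × Int) => decide (toLex a < toLex b)) := by
    funext a b
    rcases lt_trichotomy a.1 b.1 with h|h|h
    · simp [Prod.Lex.lt_iff, h]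
    · simp [Prod.Lex.lt_iff, h]
    · simp [Prod.Lex.lt_iff, h, h.ne', lt_asymm h]
  rw [hcmp]

-- in a strictly key-increasing list, the count of elements below the element at index k is k
theorem countP_lt_of_pairwise {α κ : Type} [LinearOrder κ] (key : α → κ) :
    ∀ (s : List α), s.Pairwise (fun a b => key a < key b) →
    ∀ (k : Nat) (h : k < s.length) (x : α), s[k] = x →
    s.countP (fun q => decide (key q < key x)) = k := by
  intro s
  induction s with
  | nil => intro _ k h; simp at h
  | cons p t ih =>
    intro hs k h x hx
    rcases List.pairwise_cons.mp hs with ⟨hp, ht⟩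
    cases k with
    | zero =>
      simp only [List.getElem_cons_zero] at hx
      subst hx
      simp only [List.countP_cons]
      have h2 : t.countP (fun q => decide (key q < key p)) = 0 := by
        rw [List.countP_eq_zero]
        intro q hq
        simp only [decide_eq_true_eq]
        exact not_lt_of_gt (hp q hq)
      simp only [h2, decide_eq_true_eq]
      simp
    | succ k =>
      have hk : k < t.length := by simpa using Nat.succ_lt_succ_iff.mp (by simpa using h)
      simp only [List.getElem_cons_succ] at hx
      have hxm : x ∈ t := hx ▸ List.getElem_mem hk
      have h1 : (decide (key p < key x)) = true := by
        simp only [decide_eq_true_eq]; exact hp _ hxm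
      simp only [List.countP_cons, h1, if_true, ih ht k hk x hx]

-- A's dict-building loop: a key not among the snd components is untouched
theorem dictloop_getD_not_mem : ∀ (s : List (Char × Int)) (d : PySem.Dict Int Int) (m x : Int),
    x ∉ s.map Prod.snd →
    ((s.foldl (fun (acc : PySem.Dict Int Int × Int) p => (acc.1.insert p.2 acc.2, acc.2 + 1)) (d, m)).1).getD x 0
      = d.getD x 0 := by
  intro s
  induction s with
  | nil => intro d m x _; rfl
  | cons p t ih =>
    intro d m x hx
    simp only [List.map_cons, List.mem_cons, not_or] at hx
    simp only [List.foldl_cons]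
    rw [ih _ _ _ hx.2, PySem.Dict.getD_insert]
    simp [hx.1]

-- A's dict-building loop assigns m + k to the snd of the k-th element (snd components distinct)
theorem dictloop_getD_getElem : ∀ (s : List (Char × Int)), (s.map Prod.snd).Nodup →
    ∀ (k : Nat) (h : k < s.length) (d : PySem.Dict Int Int) (m : Int),
    ((s.foldl (fun (acc : PySem.Dict Int Int × Int) p => (acc.1.insert p.2 acc.2, acc.2 + 1)) (d, m)).1).getD (s[k].2) 0
      = m + k := by
  intro s
  induction s with
  | nil => intro _ k h; simp at h
  | cons p t ih =>
    intro hnd k h d m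
    simp only [List.map_cons, List.nodup_cons] at hnd
    cases k with
    | zero =>
      simp only [List.getElem_cons_zero, List.foldl_cons]
      rw [dictloop_getD_not_mem t _ _ _ hnd.1, PySem.Dict.getD_insert]
      simp
    | succ k =>
      have hk : k < t.length := by simpa using Nat.succ_lt_succ_iff.mp (by simpa using h)
      simp only [List.getElem_cons_succ, List.foldl_cons]
      rw [ih hnd.2 k hk]
      push_cast
      ring

-- zip with the index range is enumerate with the components swapped
theorem zip_pyRange_eq_swap_enumerate : ∀ (cs : List Char) (s : Int),
    cs.zip (PySem.List.pyRange s (s + cs.length) 1)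
      = (PySem.List.enumerate cs s).map Prod.swap := by
  intro cs
  induction cs with
  | nil => intro s; simp [PySem.List.pyRange_one_eq_nil]
  | cons c t ih =>
    intro s
    have hlt : s < s + ((c :: t).length : Int) := by
      simp only [List.length_cons]; push_cast; omega
    rw [PySem.List.pyRange_one_cons hlt]
    simp only [List.zip_cons_cons, PySem.List.enumerate_cons, List.map_cons, Prod.swap_prod_mk]
    congr 1
    have := ih (s + 1)
    rw [show s + ((c :: t).length : Int) = (s + 1) + (t.length : Int) by
      simp only [List.length_cons]; push_cast; omega]
    exact this

-- the two ports agree on every input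
theorem get_numeric_key_eq_alt (key : String) : get_numeric_key key = get_numeric_key_alt key := by
  unfold get_numeric_key get_numeric_key_alt
  simp only [PySem.Str.len_eq]
  generalize (PySem.Str.upper key).toList = cs
  have hps : cs.zip (PySem.List.pyRange 0 (cs.length : Int) 1)
      = (PySem.List.enumerate cs 0).map Prod.swap := by
    simpa using zip_pyRange_eq_swap_enumerate cs 0
  rw [sorted2_eq_sorted_lex]
  set ps := cs.zip (PySem.List.pyRange 0 (cs.length : Int) 1) with hps_def
  set s := PySem.List.sorted ps (fun p => toLex p) with hs_def
  have hperm : s.Perm ps := PySem.List.sorted_perm ps _ false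
  have hmapsnd : ps.map Prod.snd = PySem.List.pyRange 0 (cs.length : Int) 1 := by
    rw [hps, List.map_map]
    have : (Prod.snd ∘ Prod.swap : Int × Char → Int) = Prod.fst := rfl
    rw [this]
    simpa using PySem.List.map_fst_enumerate cs 0
  have hnodsnd : (ps.map Prod.snd).Nodup := by
    rw [hmapsnd]; exact PySem.List.nodup_pyRange_one 0 _
  have hnodps : ps.Nodup := hnodsnd.of_map
  have hsnod : (s.map Prod.snd).Nodup := ((hperm.map Prod.snd).nodup_iff).mpr hnodsnd
  have hpw : s.Pairwise (fun a b => toLex a < toLex b) := by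
    have h1 : s.Pairwise (fun a b => toLex a ≤ toLex b) := PySem.List.sorted_pairwise ps _
    have h2 : s.Nodup := (hperm.nodup_iff).mpr hnodps
    exact (h1.and h2).imp (fun {a b} hab =>
      lt_of_le_of_ne hab.1 (fun he => hab.2 (toLex.injective he)))
  have hlenps : ps.length = cs.length := by
    rw [hps_def]
    simp [PySem.List.length_pyRange_one]
  clear_value s ps
  apply List.ext_getElem
  · simp [PySem.List.length_pyRange_one, PySem.List.length_enumerate]
  intro j hj1 hj2
  have hjn : j < cs.length := by
    simpa [PySem.List.length_pyRange_one] using hj1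
  simp only [List.getElem_map, PySem.List.getElem_pyRange_one,
    PySem.List.getElem_enumerate]
  have hjp : j < ps.length := by rw [hlenps]; exact hjn
  have hxj : ps[j]'hjp = (cs[j], (j : Int)) := by
    simp only [hps_def, List.getElem_zip, PySem.List.getElem_pyRange_one]
    simp
  have hxmem : (cs[j], (j : Int)) ∈ s := by
    rw [hperm.mem_iff]
    exact hxj ▸ List.getElem_mem hjp
  obtain ⟨k, hk, hsk⟩ := List.mem_iff_getElem.mp hxmem
  -- A's value at original index j is 1 + k, the dict rank of its pair in the sorted list
  have hA : ((s.foldl (fun (acc : PySem.Dict Int Int × Int) p => (acc.1.insert p.2 acc.2, acc.2 + 1))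
      (PySem.Dict.empty, 1)).1).getD (0 + (j : Int)) 0 = 1 + (k : Int) := by
    have := dictloop_getD_getElem s hsnod k hk PySem.Dict.empty 1
    rw [hsk] at this
    simpa using this
  rw [hA]
  -- and k is B's count of strictly smaller pairs
  have hcount : s.countP (fun q => decide (toLex q < toLex (cs[j], (j : Int)))) = k :=
    countP_lt_of_pairwise (fun p => toLex p) s hpw k hk _ hsk
  have hcount2 : (PySem.List.enumerate cs 0).countP
      (fun q => decide (q.2 < cs[j] ∨ (q.2 = cs[j] ∧ q.1 < 0 + (j : Int)))) = k := by
    rw [← hcount, hperm.countP_eq, hps, List.countP_map]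
    congr 1
    funext q
    simp only [Function.comp]
    apply decide_eq_decide.mpr
    rw [Prod.Lex.lt_iff]
    constructor
    · rintro (h | ⟨h1, h2⟩)
      · left; exact h
      · right; exact ⟨h1, by simpa using h2⟩
    · rintro (h | ⟨h1, h2⟩)
      · left; exact h
      · right; exact ⟨h1, by simpa using h2⟩
  rw [hcount2]

-- ===== VERDICT (by name: the statement is the Claim_ definition above) =====
theorem get_numeric_key_spec : Claim_equal_get_numeric_key := by
  intro key _
  unfold Spec_get_numeric_key
  exact get_numeric_key_eq_alt key
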